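-- pv_equiv track=rewrite | github.com/Saravana-kr22/test_case_scrapper | cadmin.py | filter_commands
-- ===== SOURCE A (Python) =====
-- def filter_commands(commands):
--     newcommand = []
--     for command in commands:
--         if "\n" in command:
--             command = command.replace("\n", "")
--         if "$" not in command:
--             newcommand.append(command)
--     size = len(newcommand)
--     # Remove all the "end" in the array
--     idx_list = [idx + 1 for idx, val in
--                 enumerate(newcommand) if val.lower() == "end"]
--     res = [newcommand[i: j] for i, j in
--            zip([0] + idx_list, idx_list +
--                ([size] if idx_list[-1] != size else []))]
--     newRes = []
--     for i in res:
--         i.pop()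
--         newRes.append(i)
--     return newRes
-- ===== SOURCE B (Python) =====
-- def filter_commands(commands):
--     """Split a cleaned command script into blocks, cutting after each
--     case-insensitive "end" terminator (the leftover tail, if any, forms the
--     last block).  Every block is returned without its final entry: the
--     terminator, or the still-pending command of an unfinished tail block.
--     A script with no terminator at all is rejected."""
--     cleaned = []
--     for command in commands:
--         if "\n" in command:
--             command = command.replace("\n", "")
--         if "$" not in command:
--             cleaned.append(command)
--     if all(c.lower() != "end" for c in cleaned):
--         raise ValueError("commands contain no 'end' terminator")
--     blocks = []
--     current = []
--     for c in cleaned: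
--         current.append(c)
--         if c.lower() == "end":
--             blocks.append(current)
--             current = []
--     if current:
--         blocks.append(current)
--     return [block[:-1] for block in blocks]
-- ===== Notes on version B (the rewrite author's own statement) =====
-- stated objective: simpler
-- what changed: Replaces A's enumerate-based index list, zip-of-slices comprehension and pop loop with one accumulator pass that groups the cleaned commands into blocks at case-insensitive 'end' markers and strips each block's final entry uniformly; Pre_ excludes inputs where no cleaned command is 'end', on which A raises IndexError and B rejects the script with ValueError.
import Mathlib
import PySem

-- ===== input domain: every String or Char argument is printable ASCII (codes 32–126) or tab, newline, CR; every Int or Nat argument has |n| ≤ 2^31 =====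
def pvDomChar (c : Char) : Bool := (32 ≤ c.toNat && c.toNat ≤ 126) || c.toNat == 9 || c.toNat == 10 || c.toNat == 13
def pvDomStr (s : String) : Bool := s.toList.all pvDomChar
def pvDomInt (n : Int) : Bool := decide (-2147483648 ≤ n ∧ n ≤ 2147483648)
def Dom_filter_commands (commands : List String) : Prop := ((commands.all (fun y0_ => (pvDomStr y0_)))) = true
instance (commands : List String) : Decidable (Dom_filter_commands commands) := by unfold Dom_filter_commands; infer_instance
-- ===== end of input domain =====

-- B replaces A's enumerate/zip/slice index machinery and pop loop with one accumulator pass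
-- that groups commands into blocks at "end" markers and strips each block's final entry
-- uniformly (objective: simpler; same O(n) cost).


-- ===== PORT A =====
-- phase 1 of A: the cleaning loop building `newcommand`
def pvA_newcommand (commands : List String) : List String :=
  commands.foldl (fun acc command =>
    let command := if PySem.Str.isIn "\n" command then PySem.Str.replace command "\n" "" else command
    if !(PySem.Str.isIn "$" command) then acc ++ [command] else acc) []

-- the comprehension `[idx + 1 for idx, val in enumerate(newcommand) if val.lower() == "end"]`
def pvA_idx (newcommand : List String) : List Int :=
  ((PySem.List.enumerate newcommand).filter (fun q => PySem.Str.lower q.2 == "end")).map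
    (fun q => q.1 + 1)

def filter_commands (commands : List String) : List (List String) :=
  let newcommand := pvA_newcommand commands
  let size : Int := PySem.List.len newcommand
  let idx_list := pvA_idx newcommand
  match PySem.List.pyGet? idx_list (-1) with   -- idx_list[-1]; none = IndexError, excluded by Pre_
  | none => []
  | some last =>
    let res := (List.zip ((0 : Int) :: idx_list)
        (idx_list ++ (if last ≠ size then [size] else []))).map
      (fun ij => PySem.List.slice newcommand (some ij.1) (some ij.2))
    -- `i.pop()` removes the last element of each slice; under Pre_ every slice is nonempty,
    -- so the pop is exactly dropLast, and the popped `i` is appended to newRes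
    res.foldl (fun newRes i => newRes ++ [i.dropLast]) []

-- ===== PORT B =====
def filter_commands_alt (commands : List String) : List (List String) :=
  let cleaned := commands.foldl (fun acc command =>
    let command := if PySem.Str.isIn "\n" command then PySem.Str.replace command "\n" "" else command
    if !(PySem.Str.isIn "$" command) then acc ++ [command] else acc) []
  if cleaned.all (fun c => !(PySem.Str.lower c == "end")) then []   -- raise ValueError; excluded by Pre_
  else
  let st := cleaned.foldl (fun (st : List (List String) × List String) command =>
    let current := st.2 ++ [command]
    if PySem.Str.lower command == "end" then (st.1 ++ [current], []) else (st.1, current))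
    ([], [])
  let blocks := st.1 ++ (if st.2 ≠ [] then [st.2] else [])
  blocks.map (fun block => PySem.List.slice block none (some (-1)))   -- block[:-1]

-- ===== PRECONDITION & SPEC =====
-- the cleaned form of one command (phase 1 applied to a single element)
def pvCleanCmd (command : String) : String :=
  if PySem.Str.isIn "\n" command then PySem.Str.replace command "\n" "" else command

-- Pre_ excludes exactly the inputs on which A raises IndexError at `idx_list[-1]`:
-- those where no surviving cleaned command equals "end" case-insensitively.
def Pre_filter_commands (commands : List String) : Prop :=
  ∃ c ∈ commands, PySem.Str.isIn "$" (pvCleanCmd c) = false ∧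
    PySem.Str.lower (pvCleanCmd c) = "end"
instance (commands : List String) : Decidable (Pre_filter_commands commands) := by
  unfold Pre_filter_commands; infer_instance

def pvWitness_filter_commands : List String := ["run", "end", "stop"]

def Spec_filter_commands (commands : List String) (out : List (List String)) : Prop := out = filter_commands_alt commands
instance (commands : List String) (out : List (List String)) : Decidable (Spec_filter_commands commands out) := by unfold Spec_filter_commands; infer_instance

-- ===== CLAIM (what is proved, stated in full; the proofs are below) =====
def Claim_equal_filter_commands : Prop := ∀ (commands : List String), Dom_filter_commands commands → Pre_filter_commands commands → Spec_filter_commands commands (filter_commands commands)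
-- ===== LEMMAS AND PROOFS =====

-- the cleaned, '$'-filtered list as a filterMap (phase 1 of both programs)
def pvCleanF (commands : List String) : List String :=
  commands.filterMap (fun c =>
    if PySem.Str.isIn "$" (pvCleanCmd c) then none else some (pvCleanCmd c))

-- completed chunks (each ending with its "end" marker) and the trailing segment
def pvChunks : List String → List (List String) × List String
  | [] => ([], [])
  | c :: cs =>
    let r := pvChunks cs
    if PySem.Str.lower c == "end" then ([c] :: r.1, r.2)
    else match r.1 with
      | [] => ([], c :: r.2)
      | s :: rs => ((c :: s) :: rs, r.2)

def pvChunksRes (nc : List String) : List (List String) :=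
  (pvChunks nc).1 ++ (if (pvChunks nc).2 ≠ [] then [(pvChunks nc).2] else [])

theorem pvA_newcommand_go (l : List String) (acc : List String) :
    l.foldl (fun acc command =>
      let command := if PySem.Str.isIn "\n" command then PySem.Str.replace command "\n" "" else command
      if !(PySem.Str.isIn "$" command) then acc ++ [command] else acc) acc
    = acc ++ pvCleanF l := by
  induction l generalizing acc with
  | nil => simp [pvCleanF]
  | cons c cs ih =>
    simp only [List.foldl_cons]
    rw [ih]
    have hcons : pvCleanF (c :: cs)
        = (if PySem.Str.isIn "$" (pvCleanCmd c) then [] else [pvCleanCmd c]) ++ pvCleanF cs := by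
      simp only [pvCleanF, List.filterMap_cons]
      cases PySem.Str.isIn "$" (pvCleanCmd c) <;> rfl
    rw [hcons]
    show (if (!PySem.Str.isIn "$" (pvCleanCmd c)) = true then acc ++ [pvCleanCmd c] else acc)
        ++ pvCleanF cs = _
    cases PySem.Str.isIn "$" (pvCleanCmd c) <;> simp [List.append_assoc]

theorem pvA_newcommand_eq (commands : List String) :
    pvA_newcommand commands = pvCleanF commands := by
  rw [pvA_newcommand]; rw [pvA_newcommand_go]; rfl

theorem pvA_idx_nil_iff (l : List String) :
    pvA_idx l = [] ↔ ∀ c ∈ l, ¬ (PySem.Str.lower c == "end") = true := by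
  simp only [pvA_idx, List.map_eq_nil_iff, List.filter_eq_nil_iff]
  constructor
  · intro h c hc
    have : c ∈ (PySem.List.enumerate l).map (·.2) := by
      rw [PySem.List.map_snd_enumerate]; exact hc
    obtain ⟨p, hp, rfl⟩ := List.mem_map.mp this
    exact h p hp
  · intro h p hp
    exact h p.2 (by rw [← PySem.List.map_snd_enumerate l 0]; exact List.mem_map_of_mem hp)

theorem pvChunks_of_idx_nil (l : List String) (h : pvA_idx l = []) :
    pvChunks l = ([], l) := by
  rw [pvA_idx_nil_iff] at h
  induction l with
  | nil => rfl
  | cons c cs ih =>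
    have hp : (PySem.Str.lower c == "end") = false := by
      have := h c (List.mem_cons_self ..)
      simpa using this
    have ih' := ih (fun x hx => h x (List.mem_cons_of_mem _ hx))
    simp [pvChunks, hp, ih']

theorem pvEnumerate_shift (xs : List String) (s : Int) :
    PySem.List.enumerate xs (s + 1) = (PySem.List.enumerate xs s).map (fun p => (p.1 + 1, p.2)) := by
  induction xs generalizing s with
  | nil => simp [PySem.List.enumerate_nil]
  | cons x xs ih =>
    rw [PySem.List.enumerate_cons, PySem.List.enumerate_cons]
    rw [show s + 1 + 1 = (s + 1) + 1 from rfl, ih (s + 1)]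
    simp

theorem pvEnumerate_shift1 (xs : List String) :
    PySem.List.enumerate xs 1 = (PySem.List.enumerate xs 0).map (fun p => (p.1 + 1, p.2)) := by
  have := pvEnumerate_shift xs 0
  simpa using this

theorem pvA_idx_cons (c : String) (cs : List String) :
    pvA_idx (c :: cs)
      = (if PySem.Str.lower c == "end" then [(1 : Int)] else []) ++ (pvA_idx cs).map (· + 1) := by
  simp only [pvA_idx, PySem.List.enumerate_cons, List.filter_cons]
  rw [show (0 : Int) + 1 = 1 from rfl, pvEnumerate_shift1]
  rw [List.filter_map, List.map_map]
  cases hp : (PySem.Str.lower c == "end") <;> simp [Function.comp_def]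

theorem pvA_idx_pos (l : List String) : ∀ i ∈ pvA_idx l, 1 ≤ i := by
  intro i hi
  simp only [pvA_idx, List.mem_map] at hi
  obtain ⟨p, hp, rfl⟩ := hi
  have hmem := (List.mem_filter.mp hp).1
  obtain ⟨k, hk, rfl⟩ := (PySem.List.mem_enumerate_iff _ _ _).mp hmem
  simp

theorem pvSlice_cons_succ (x : String) (xs : List String) (i j : Int) (hi : 0 ≤ i) (hj : 0 ≤ j) :
    PySem.List.slice (x :: xs) (some (i + 1)) (some (j + 1))
      = PySem.List.slice xs (some i) (some j) := by
  rw [PySem.List.slice_toNat _ (by omega) (by omega), PySem.List.slice_toNat _ hi hj]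
  have h1 : (i + 1).toNat = i.toNat + 1 := by omega
  have h2 : (j + 1).toNat = j.toNat + 1 := by omega
  simp [h1, h2]

theorem pvSlice_cons_zero (x : String) (xs : List String) (j : Int) (hj : 0 ≤ j) :
    PySem.List.slice (x :: xs) (some 0) (some (j + 1))
      = x :: PySem.List.slice xs (some 0) (some j) := by
  rw [PySem.List.slice_toNat _ le_rfl (by omega), PySem.List.slice_toNat _ le_rfl hj]
  have h2 : (j + 1).toNat = j.toNat + 1 := by omega
  simp [h2]

theorem pvShift (c : String) (cs : List String) (A B : List Int)
    (hA : ∀ i ∈ A, 0 ≤ i) (hB : ∀ j ∈ B, 0 ≤ j) :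
    (List.zip (A.map (· + 1)) (B.map (· + 1))).map
        (fun ij => PySem.List.slice (c :: cs) (some ij.1) (some ij.2))
      = (List.zip A B).map (fun ij => PySem.List.slice cs (some ij.1) (some ij.2)) := by
  rw [List.zip_map, List.map_map]
  apply List.map_congr_left
  intro q hq
  obtain ⟨a, b⟩ := q
  have h1 := hA a (List.of_mem_zip hq).1
  have h2 := hB b (List.of_mem_zip hq).2
  simpa using pvSlice_cons_succ c cs a b h1 h2

theorem pvChunks_fst_nil (l : List String) (h : (pvChunks l).1 = []) : pvA_idx l = [] := by
  induction l with
  | nil => rfl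
  | cons c cs ih =>
    cases hp : (PySem.Str.lower c == "end") with
    | true => exfalso; simp [pvChunks, hp] at h
    | false =>
      rcases hr : (pvChunks cs).1 with _ | ⟨s, rs⟩
      · rw [pvA_idx_cons]; simp [hp, ih hr]
      · exfalso; simp [pvChunks, hp, hr] at h

theorem pvChunks_cons_end (c : String) (cs : List String)
    (hp : (PySem.Str.lower c == "end") = true) :
    pvChunks (c :: cs) = ([c] :: (pvChunks cs).1, (pvChunks cs).2) := by
  simp [pvChunks, hp]

theorem pvRes_eq_chunks (nc : List String) (last : Int)
    (h : (pvA_idx nc).getLast? = some last) :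
    (List.zip ((0 : Int) :: pvA_idx nc)
        (pvA_idx nc ++ (if last ≠ PySem.List.len nc then [PySem.List.len nc] else []))).map
      (fun ij => PySem.List.slice nc (some ij.1) (some ij.2)) = pvChunksRes nc := by
  induction nc generalizing last with
  | nil => simp [pvA_idx, PySem.List.enumerate_nil] at h
  | cons c cs ih =>
    have hlen : PySem.List.len (c :: cs) = PySem.List.len cs + 1 := by
      simp [PySem.List.len_eq]
    have hpos := pvA_idx_pos cs
    rw [pvA_idx_cons] at ⊢
    cases hp : (PySem.Str.lower c == "end") with
    | false =>
      rw [pvA_idx_cons, hp] at h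
      simp only [Bool.false_eq_true, if_false, List.nil_append] at h ⊢
      rw [List.getLast?_map] at h
      obtain ⟨last', hl', rfl⟩ := Option.map_eq_some_iff.mp h
      obtain ⟨a, il'', hil⟩ : ∃ a il'', pvA_idx cs = a :: il'' := by
        rcases hx : pvA_idx cs with _ | ⟨a, il''⟩
        · rw [hx] at hl'; simp at hl'
        · exact ⟨a, il'', rfl⟩
      have ih' := ih last' hl'
      have ha1 : (1:Int) ≤ a := hpos a (by rw [hil]; exact List.mem_cons_self ..)
      have hT : (if last' + 1 ≠ PySem.List.len (c :: cs) then [PySem.List.len (c :: cs)] else [])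
          = (if last' ≠ PySem.List.len cs then [PySem.List.len cs] else []).map (· + 1) := by
        rw [hlen]
        by_cases hc : last' = PySem.List.len cs
        · simp [hc]
        · rw [if_pos (by omega), if_pos hc]; rfl
      rw [hT, hil]
      have hTpos : ∀ j ∈ (if last' ≠ PySem.List.len cs then [PySem.List.len cs] else []), (0:Int) ≤ j := by
        intro j hj
        have hsplit : (if last' ≠ PySem.List.len cs then [PySem.List.len cs] else []) = []
            ∨ (if last' ≠ PySem.List.len cs then [PySem.List.len cs] else []) = [PySem.List.len cs] := by
          by_cases hc : last' ≠ PySem.List.len cs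
          · exact Or.inr (if_pos hc)
          · exact Or.inl (if_neg hc)
        rcases hsplit with hE | hE <;> rw [hE] at hj
        · cases hj
        · have : j = PySem.List.len cs := by simpa using hj
          rw [this, PySem.List.len_eq]; positivity
      have hA : ∀ i ∈ a :: il'', (0:Int) ≤ i :=
        fun i hi => le_trans (by norm_num) (hpos i (by rw [hil]; exact hi))
      have hB : ∀ j ∈ il'' ++ (if last' ≠ PySem.List.len cs then [PySem.List.len cs] else []), (0:Int) ≤ j := by
        intro j hj
        rcases List.mem_append.mp hj with hj | hj
        · exact le_trans (by norm_num) (hpos j (by rw [hil]; exact List.mem_cons_of_mem _ hj))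
        · exact hTpos j hj
      have hsh := pvShift c cs (a :: il'')
        (il'' ++ (if last' ≠ PySem.List.len cs then [PySem.List.len cs] else [])) hA hB
      simp only [List.map_cons, List.map_append] at hsh
      simp only [List.map_cons, List.cons_append, List.zip_cons_cons, List.map_cons]
      rw [hsh]
      rw [hil] at ih'
      simp only [List.cons_append, List.zip_cons_cons, List.map_cons] at ih'
      obtain ⟨s, rs, hch⟩ : ∃ s rs, (pvChunks cs).1 = s :: rs := by
        rcases hx : (pvChunks cs).1 with _ | ⟨s, rs⟩
        · exact absurd (pvChunks_fst_nil cs hx) (by rw [hil]; simp)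
        · exact ⟨s, rs, rfl⟩
      have hres : pvChunksRes cs
          = s :: (rs ++ (if (pvChunks cs).2 ≠ [] then [(pvChunks cs).2] else [])) := by
        rw [pvChunksRes, hch]; rfl
      rw [hres] at ih'
      obtain ⟨hhead, htail⟩ := List.cons_eq_cons.mp ih'
      have hchc : pvChunksRes (c :: cs)
          = (c :: s) :: (rs ++ (if (pvChunks cs).2 ≠ [] then [(pvChunks cs).2] else [])) := by
        rw [pvChunksRes]
        simp [pvChunks, hp, hch]
      rw [hchc, htail, pvSlice_cons_zero c cs a (by omega), hhead]
    | true =>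
      rw [pvA_idx_cons, hp] at h
      simp only [if_true, List.singleton_append] at h ⊢
      have hc1 : PySem.List.slice (c :: cs) (some 0) (some 1) = [c] := by
        rw [PySem.List.slice_zero_start]
        have h0 := pvSlice_cons_zero c cs 0 le_rfl
        norm_num at h0
        rw [h0, PySem.List.slice_to cs le_rfl]
        simp
      rcases hx : pvA_idx cs with _ | ⟨a, il''⟩
      · rw [hx] at h
        simp only [List.map_nil, List.getLast?_singleton, Option.some.injEq] at h
        subst h
        rcases cs with _ | ⟨d, ds⟩
        · have hone : PySem.List.len ([c] : List String) = 1 := by simp [PySem.List.len_eq]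
          rw [hone]
          simp only [ne_eq, not_true, if_false, List.map_nil, List.append_nil,
            List.zip_cons_cons, List.zip_nil_right, List.map_cons, List.map_nil, hc1]
          simp [pvChunksRes, pvChunks, hp]
        · have hgt : (1:Int) ≠ PySem.List.len (c :: d :: ds) := by
            rw [PySem.List.len_eq]
            have : (List.length (c :: d :: ds) : Int) = (ds.length : Int) + 2 := by
              simp; omega
            omega
          simp only [List.map_nil, if_pos hgt]
          simp only [List.cons_append, List.nil_append, List.zip_cons_cons,
            List.zip_nil_right, List.map_cons, List.map_nil, hc1]
          have hslice : PySem.List.slice (c :: d :: ds) (some 1) (some (PySem.List.len (c :: d :: ds))) = d :: ds := by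
            rw [hlen]
            have hld : PySem.List.len (d :: ds) = (ds.length : Int) + 1 := by
              simp [PySem.List.len_eq]
            rw [hld]
            have h1 := pvSlice_cons_succ c (d :: ds) 0 ((ds.length : Int) + 1) le_rfl (by positivity)
            norm_num at h1
            rw [h1, PySem.List.slice_to (d :: ds) (by positivity)]
            have h2 : ((ds.length : Int) + 1).toNat = ds.length + 1 := by omega
            rw [h2]
            simp [List.take_succ_cons]
          rw [hslice]
          have hnil := pvChunks_of_idx_nil (d :: ds) hx
          rw [pvChunksRes, pvChunks_cons_end _ _ hp, hnil]
          simp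
      · rw [hx] at h
        simp only [List.map_cons, List.getLast?_cons_cons] at h
        rw [show ((a+1) :: List.map (· + 1) il'') = (a :: il'').map (· + 1) from rfl,
          List.getLast?_map] at h
        obtain ⟨last', hl', rfl⟩ := Option.map_eq_some_iff.mp h
        have hl'' : (pvA_idx cs).getLast? = some last' := by rw [hx]; exact hl'
        have ih' := ih last' hl''
        have hT : (if last' + 1 ≠ PySem.List.len (c :: cs) then [PySem.List.len (c :: cs)] else [])
            = (if last' ≠ PySem.List.len cs then [PySem.List.len cs] else []).map (· + 1) := by
          rw [hlen]
          by_cases hc : last' = PySem.List.len cs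
          · simp [hc]
          · rw [if_pos (by omega), if_pos hc]; rfl
        rw [hT]
        have hTpos : ∀ j ∈ (if last' ≠ PySem.List.len cs then [PySem.List.len cs] else []), (0:Int) ≤ j := by
          intro j hj
          have hsplit : (if last' ≠ PySem.List.len cs then [PySem.List.len cs] else []) = []
              ∨ (if last' ≠ PySem.List.len cs then [PySem.List.len cs] else []) = [PySem.List.len cs] := by
            by_cases hc : last' ≠ PySem.List.len cs
            · exact Or.inr (if_pos hc)
            · exact Or.inl (if_neg hc)
          rcases hsplit with hE | hE <;> rw [hE] at hj
          · cases hj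
          · have : j = PySem.List.len cs := by simpa using hj
            rw [this, PySem.List.len_eq]; positivity
        have hA : ∀ i ∈ a :: il'', (0:Int) ≤ i :=
          fun i hi => le_trans (by norm_num) (hpos i (by rw [hx]; exact hi))
        have hB : ∀ j ∈ il'' ++ (if last' ≠ PySem.List.len cs then [PySem.List.len cs] else []), (0:Int) ≤ j := by
          intro j hj
          rcases List.mem_append.mp hj with hj | hj
          · exact le_trans (by norm_num) (hpos j (by rw [hx]; exact List.mem_cons_of_mem _ hj))
          · exact hTpos j hj
        have hsh := pvShift c cs (a :: il'')
          (il'' ++ (if last' ≠ PySem.List.len cs then [PySem.List.len cs] else [])) hA hB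
        simp only [List.map_cons, List.map_append] at hsh
        have ha0 : (0:Int) ≤ a :=
          le_trans (by norm_num) (hpos a (by rw [hx]; exact List.mem_cons_self ..))
        have hs1 := pvSlice_cons_succ c cs 0 a le_rfl ha0
        norm_num at hs1
        simp only [List.map_cons, List.cons_append, List.zip_cons_cons]
        rw [hc1, hs1, hsh]
        rw [hx] at ih'
        simp only [List.cons_append, List.zip_cons_cons, List.map_cons,
          PySem.List.slice_zero_start] at ih'
        have hcc : pvChunksRes (c :: cs) = [c] :: pvChunksRes cs := by
          rw [pvChunksRes, pvChunksRes]; simp [pvChunks, hp]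
        rw [hcc, ← ih']

-- B's second loop computes pvChunks
theorem pvB_foldl (l : List String) (res : List (List String)) (cur : List String) :
    l.foldl (fun (st : List (List String) × List String) command =>
      let current := st.2 ++ [command]
      if PySem.Str.lower command == "end" then (st.1 ++ [current], []) else (st.1, current))
      (res, cur)
    = (match (pvChunks l).1 with
       | [] => (res, cur ++ (pvChunks l).2)
       | s :: rs => (res ++ ((cur ++ s) :: rs), (pvChunks l).2)) := by
  induction l generalizing res cur with
  | nil => simp [pvChunks]
  | cons c cs ih =>
    simp only [List.foldl_cons]
    by_cases hp : (PySem.Str.lower c == "end") = true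
    · rw [if_pos hp, ih, pvChunks_cons_end c cs hp]
      rcases hr : (pvChunks cs).1 with _ | ⟨s, rs⟩ <;>
        simp [List.append_assoc]
    · rw [if_neg hp, ih]
      rcases hr : (pvChunks cs).1 with _ | ⟨s, rs⟩ <;>
        simp [pvChunks, hp, hr, List.append_assoc]

theorem filter_commands_alt_eval (commands : List String)
    (hsome : ¬ (pvCleanF commands).all (fun c => !(PySem.Str.lower c == "end")) = true) :
    filter_commands_alt commands
      = (pvChunksRes (pvCleanF commands)).map List.dropLast := by
  simp only [filter_commands_alt]
  rw [pvA_newcommand_go, List.nil_append, pvB_foldl, if_neg (by simpa using hsome)]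
  have hmap : ∀ bs : List (List String),
      bs.map (fun block => PySem.List.slice block none (some (-1))) = bs.map List.dropLast := by
    intro bs; exact List.map_congr_left (fun b _ => PySem.List.slice_to_neg_one b)
  rcases hr : (pvChunks (pvCleanF commands)).1 with _ | ⟨s, rs⟩
  · simp only [pvChunksRes, hr, List.nil_append]
    by_cases h2 : (pvChunks (pvCleanF commands)).2 = [] <;> simp [h2, hmap]
  · simp only [pvChunksRes, hr]
    by_cases h2 : (pvChunks (pvCleanF commands)).2 = [] <;> simp [h2, hmap]

theorem filter_commands_A_eval (commands : List String) (last : Int)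
    (hlast : (pvA_idx (pvCleanF commands)).getLast? = some last) :
    filter_commands commands = (pvChunksRes (pvCleanF commands)).map List.dropLast := by
  simp only [filter_commands, pvA_newcommand_eq, PySem.List.pyGet?_neg_one, hlast]
  rw [PySem.List.foldl_append_singleton_eq_map, pvRes_eq_chunks _ last hlast]
  simp

-- ===== VERDICT (by name: the statements are the Claim_ definitions above) =====
theorem filter_commands_spec : Claim_equal_filter_commands := by
  intro commands _hdom hpre
  show filter_commands commands = filter_commands_alt commands
  have hne : pvA_idx (pvCleanF commands) ≠ [] := by
    intro h0
    rw [pvA_idx_nil_iff] at h0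
    obtain ⟨c, hc, hd, hend⟩ := hpre
    have hmem : pvCleanCmd c ∈ pvCleanF commands := by
      rw [pvCleanF]
      exact List.mem_filterMap.mpr ⟨c, hc, by rw [if_neg (by simpa using hd)]⟩
    exact h0 _ hmem (by simp [hend])
  obtain ⟨last, hlast⟩ : ∃ last, (pvA_idx (pvCleanF commands)).getLast? = some last := by
    cases hx : (pvA_idx (pvCleanF commands)).getLast? with
    | none => exact absurd (List.getLast?_eq_none_iff.mp hx) hne
    | some l => exact ⟨l, rfl⟩
  have hsome : ¬ (pvCleanF commands).all (fun c => !(PySem.Str.lower c == "end")) = true := by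
    obtain ⟨c, hc, hd, hend⟩ := hpre
    intro hall
    have hmem : pvCleanCmd c ∈ pvCleanF commands := by
      rw [pvCleanF]
      exact List.mem_filterMap.mpr ⟨c, hc, by rw [if_neg (by simpa using hd)]⟩
    have := List.all_eq_true.mp hall _ hmem
    simp [hend] at this
  rw [filter_commands_A_eval commands last hlast, filter_commands_alt_eval commands hsome]
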